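-- pv_equiv track=rewrite | github.com/haolunc/ARC-RL | reference_solutions/solutions/88a62173.py | transform
-- ===== SOURCE A (Python) =====
-- def transform(grid):
--
--     n = len(grid)
--     k = n // 2
--     mid = k
--
--     corners = []
--     for r, c in [(0, 0), (0, mid + 1), (mid + 1, 0), (mid + 1, mid + 1)]:
--         block = [grid[i][c:c + k] for i in range(r, r + k)]
--         corners.append(block)
--
--     def block_key(b):
--         return tuple(tuple(row) for row in b)
--
--     counts = {}
--     for b in corners:
--         key = block_key(b)
--         counts[key] = counts.get(key, 0) + 1
--
--     for b in corners:
--         if counts[block_key(b)] == 1: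
--             return b
--
--     return corners[0]
-- ===== SOURCE B (Python) =====
-- def transform(grid):
--     n = len(grid)
--     k = n // 2
--     top, bot = grid[:k], grid[k + 1:2 * k + 1]
--     a = [row[:k] for row in top]
--     b = [row[k + 1:2 * k + 1] for row in top]
--     c = [row[:k] for row in bot]
--     d = [row[k + 1:2 * k + 1] for row in bot]
--     if a == b:
--         if a == c:
--             return d if d != a else a
--         if a == d:
--             return c
--         return c if c != d else a
--     if a == c:
--         if a == d:
--             return b
--         return b if b != d else a
--     if a == d:
--         return b if b != c else a
--     return a
-- ===== Notes on version B (the rewrite author's own statement) =====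
-- stated objective: alternative
-- what changed: Replaces A's per-index block extraction plus tuple-key counter dict and count-lookup scan by wholesale grid/row slicing into the four quadrants and a branching pairwise-comparison decision tree (six equality tests with early exits, no key table and no counting).
import Mathlib
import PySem

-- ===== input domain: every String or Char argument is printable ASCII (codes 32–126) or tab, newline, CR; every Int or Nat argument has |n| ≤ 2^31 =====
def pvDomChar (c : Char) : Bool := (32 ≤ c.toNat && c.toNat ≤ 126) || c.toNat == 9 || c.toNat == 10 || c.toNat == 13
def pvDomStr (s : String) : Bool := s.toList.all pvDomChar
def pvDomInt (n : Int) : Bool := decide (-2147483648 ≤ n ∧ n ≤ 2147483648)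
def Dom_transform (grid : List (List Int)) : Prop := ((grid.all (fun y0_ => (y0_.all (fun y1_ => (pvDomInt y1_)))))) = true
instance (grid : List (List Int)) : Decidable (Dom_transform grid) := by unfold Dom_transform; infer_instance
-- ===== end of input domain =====

-- B replaces A's index-loop extraction + tuple-key counter dict + count-lookup scan
-- by wholesale slicing into four quadrants and a pairwise-comparison decision tree
-- (no counting at all); objective: alternative.

-- ===== PORT A =====
-- the final 'for b in corners: if counts[block_key(b)] == 1: return b' loop
def transformFindA (counts : PySem.Dict (List (List Int)) Int) :
    List (List (List Int)) → Option (List (List Int))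
  | [] => none
  | b :: rest => if counts.getD b 0 == 1 then some b else transformFindA counts rest

def transform (grid : List (List Int)) : List (List Int) :=
  let n : Int := grid.length
  let k : Int := PySem.Int.floordiv n 2
  let mid : Int := k
  let corners : List (List (List Int)) :=
    [((0:Int), (0:Int)), (0, mid + 1), (mid + 1, 0), (mid + 1, mid + 1)].foldl
      (fun acc rc =>
        acc ++ [(PySem.List.pyRange rc.1 (rc.1 + k) 1).map
          (fun i => PySem.List.slice (PySem.List.pyGetD grid i []) (some rc.2) (some (rc.2 + k)))])
      []
  -- block_key is the identity in this model (tuple of tuples ≈ list of lists)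
  let counts : PySem.Dict (List (List Int)) Int :=
    corners.foldl (fun d b => d.insert b (d.getD b 0 + 1)) PySem.Dict.empty
  match transformFindA counts corners with
  | some b => b
  | none => corners.headD []   -- corners[0]; corners is never empty (4 blocks)

-- ===== PORT B =====
def transform_alt (grid : List (List Int)) : List (List Int) :=
  let n : Int := grid.length
  let k : Int := PySem.Int.floordiv n 2
  let top := PySem.List.slice grid none (some k)
  let bot := PySem.List.slice grid (some (k + 1)) (some (2 * k + 1))
  let a := top.map (fun row => PySem.List.slice row none (some k))
  let b := top.map (fun row => PySem.List.slice row (some (k + 1)) (some (2 * k + 1)))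
  let c := bot.map (fun row => PySem.List.slice row none (some k))
  let d := bot.map (fun row => PySem.List.slice row (some (k + 1)) (some (2 * k + 1)))
  if a = b then
    if a = c then (if d ≠ a then d else a)
    else if a = d then c
    else if c ≠ d then c else a
  else if a = c then
    if a = d then b else if b ≠ d then b else a
  else if a = d then (if b ≠ c then b else a)
  else a

-- ===== PRECONDITION & SPEC =====
-- A raises IndexError (grid[mid+1+…] out of range) whenever len(grid) is even and ≥ 2;
-- Pre_ keeps exactly the inputs on which A returns: odd length or the empty grid.
def Pre_transform (grid : List (List Int)) : Prop :=
  grid.length % 2 = 1 ∨ grid.length = 0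
instance (grid : List (List Int)) : Decidable (Pre_transform grid) := by
  unfold Pre_transform; infer_instance

def pvWitness_transform : List (List Int) := [[1, 2, 3], [4, 5, 6], [7, 8, 9]]

def Spec_transform (grid : List (List Int)) (out : List (List Int)) : Prop := out = transform_alt grid
instance (grid : List (List Int)) (out : List (List Int)) : Decidable (Spec_transform grid out) := by unfold Spec_transform; infer_instance

-- ===== CLAIM (what is proved, stated in full; the proofs are below) =====
def Claim_equal_transform : Prop := ∀ (grid : List (List Int)), Dom_transform grid → Pre_transform grid → Spec_transform grid (transform grid)

-- ===== LEMMAS AND PROOFS =====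

-- A's dict-count search over a list agrees with a direct-count search
def findByCount (corners : List (List (List Int))) :
    List (List (List Int)) → Option (List (List Int))
  | [] => none
  | b :: rest => if corners.count b == 1 then some b else findByCount corners rest

theorem findA_eq_findByCount (corners rest : List (List (List Int))) :
    transformFindA
      (corners.foldl (fun d b => d.insert b (d.getD b 0 + 1)) PySem.Dict.empty) rest
    = findByCount corners rest := by
  induction rest with
  | nil => rfl
  | cons b rest ih =>
    rw [PySem.Dict.foldl_insert_getD_add_one_eq_counter] at ih ⊢
    simp only [transformFindA, findByCount, PySem.Dict.getD_counter]
    by_cases h : corners.count b = 1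
    · simp [h]
    · simp [h, ih]

-- the count-of-four scan equals the pairwise-comparison decision tree
theorem pick4 (a b c d : List (List Int)) :
    (match findByCount [a, b, c, d] [a, b, c, d] with
     | some x => x
     | none => ([a, b, c, d] : List (List (List Int))).headD []) =
    (if a = b then
      if a = c then (if d ≠ a then d else a)
      else if a = d then c
      else if c ≠ d then c else a
    else if a = c then
      if a = d then b else if b ≠ d then b else a
    else if a = d then (if b ≠ c then b else a)
    else a) := by
  by_cases hab : a = b <;> by_cases hac : a = c <;> by_cases had : a = d <;>
    by_cases hbc : b = c <;> by_cases hbd : b = d <;> by_cases hcd : c = d <;>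
    simp_all [findByCount, List.count_nil, eq_comm]

-- A's row-index loop over a range equals mapping over a slice of the grid
theorem rows_eq (xs : List (List Int)) (f : List Int → List Int) (r : Int) (kn : Nat)
    (h0 : 0 ≤ r) (hb : r.toNat + kn ≤ xs.length) :
    (PySem.List.pyRange r (r + kn) 1).map
      (fun i => f (PySem.List.pyGetD xs i ([] : List Int))) =
    ((xs.drop r.toNat).take kn).map f := by
  induction kn generalizing r with
  | zero =>
    rw [PySem.List.pyRange_one_eq_nil (by omega)]
    simp
  | succ m ih =>
    have hlt : r.toNat < xs.length := by omega
    have hcast : r + ((m + 1 : Nat) : Int) = (r + 1) + (m : Nat) := by push_cast; ring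
    rw [hcast, PySem.List.pyRange_one_cons (by omega),
      List.drop_eq_getElem_cons hlt, List.take_succ_cons, List.map_cons, List.map_cons]
    congr 1
    · rw [PySem.List.pyGetD_eq_getElem xs ([] : List Int) h0 (by exact_mod_cast (by omega : r < (xs.length : Int)))]
    · have hsucc : (r + 1).toNat = r.toNat + 1 := by omega
      rw [← hsucc]
      exact ih (r + 1) (by omega) (by omega)

-- ===== VERDICT (by name: the statement is the Claim_ definition above) =====
theorem transform_spec : Claim_equal_transform := by
  intro grid _ hpre
  rcases hpre with hodd | hz
  case inr =>
    have : grid = [] := List.length_eq_zero_iff.mp hz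
    subst this; decide
  case inl =>
    unfold Spec_transform transform transform_alt
    simp only [PySem.List.foldl_append_singleton_eq_map, List.nil_append, List.map_cons,
      List.map_nil, findA_eq_findByCount]
    set kn : Nat := grid.length / 2 with hkn
    have hlen : grid.length = 2 * kn + 1 := by omega
    have hk : PySem.Int.floordiv (grid.length : Int) 2 = (kn : Int) := by
      exact_mod_cast PySem.Int.floordiv_natCast grid.length 2
    rw [hk]
    have e1 := rows_eq grid
      (fun row => PySem.List.slice row (some 0) (some (0 + (kn : Int)))) 0 kn
      (by omega) (by omega)
    have e2 := rows_eq grid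
      (fun row => PySem.List.slice row (some ((kn : Int) + 1)) (some ((kn : Int) + 1 + (kn : Int)))) 0 kn
      (by omega) (by omega)
    have e3 := rows_eq grid
      (fun row => PySem.List.slice row (some 0) (some (0 + (kn : Int)))) ((kn : Int) + 1) kn
      (by omega) (by omega)
    have e4 := rows_eq grid
      (fun row => PySem.List.slice row (some ((kn : Int) + 1)) (some ((kn : Int) + 1 + (kn : Int)))) ((kn : Int) + 1) kn
      (by omega) (by omega)
    rw [e1, e2, e3, e4]
    have htop : PySem.List.slice grid none (some (kn : Int)) = grid.take kn :=
      PySem.List.slice_to_natCast grid kn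
    have hbot : PySem.List.slice grid (some ((kn : Int) + 1)) (some (2 * (kn : Int) + 1))
        = (grid.drop (kn + 1)).take kn := by
      rw [show ((kn : Int) + 1) = (((kn + 1 : Nat)) : Int) by push_cast; ring,
        show (2 * (kn : Int) + 1) = (((kn + 1 : Nat)) : Int) + ((kn : Nat) : Int) by push_cast; ring,
        PySem.List.slice_natCast_add]
    rw [htop, hbot, show ((kn : Int) + 1).toNat = kn + 1 by omega, Int.toNat_zero, List.drop_zero]
    simp only [show (0 : Int) + (kn : Int) = (kn : Int) by ring,
      show (kn : Int) + 1 + (kn : Int) = 2 * (kn : Int) + 1 by ring,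
      PySem.List.slice_zero_start]
    exact pick4 _ _ _ _
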